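-- pv_equiv track=rewrite | github.com/VincentYChia/Game-1 | Game-1-modular/systems/geography/village_generator.py | _distribute_entrances
-- ===== SOURCE A (Python) =====
-- from typing import Dict, List, Optional, Tuple
--
-- def _distribute_entrances(num_entrances: int) -> List[str]:
--     """Distribute entrances evenly across 4 walls.
--
--     Returns list of wall names that get entrances.
--     4 entrances = one per wall (N, S, E, W).
--     5 = one per wall + one extra on south.
--     3 = south + north + east.
--     """
--     walls = ["south", "north", "east", "west"]
--     if num_entrances <= 0:
--         return []
--     if num_entrances >= 4:
--         result = list(walls)
--         # Extra entrances distributed round-robin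
--         extras = num_entrances - 4
--         for i in range(extras):
--             result.append(walls[i % 4])
--         return result
--     # Fewer than 4: take first N from priority order
--     return walls[:num_entrances]
-- ===== SOURCE B (Python) =====
-- def _distribute_entrances(num_entrances: int) -> list:
--     """Distribute entrances across 4 walls: repeat the wall cycle ceil(n/4) times, truncate to n."""
--     walls = ["south", "north", "east", "west"]
--     return (walls * ((num_entrances + 3) // 4))[:num_entrances]
-- ===== Notes on version B (the rewrite author's own statement) =====
-- stated objective: simpler
-- what changed: Replaces A's three-way branching (empty return, slice for <4, base list plus round-robin append loop) with a loop-free replicate-and-truncate: repeat the 4-wall list ceil(n/4) times via list multiplication and slice to n.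
import Mathlib
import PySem

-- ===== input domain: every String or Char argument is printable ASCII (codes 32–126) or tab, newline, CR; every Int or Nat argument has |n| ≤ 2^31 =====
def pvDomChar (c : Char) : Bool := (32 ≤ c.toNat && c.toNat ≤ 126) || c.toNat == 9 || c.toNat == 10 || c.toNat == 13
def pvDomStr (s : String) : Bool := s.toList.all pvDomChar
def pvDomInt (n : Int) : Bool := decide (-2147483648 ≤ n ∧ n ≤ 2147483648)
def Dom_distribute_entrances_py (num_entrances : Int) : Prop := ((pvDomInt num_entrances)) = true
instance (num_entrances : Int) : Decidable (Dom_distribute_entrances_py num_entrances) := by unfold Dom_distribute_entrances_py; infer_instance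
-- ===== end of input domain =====

-- B replaces A's three-way branching and round-robin append loop with a loop-free
-- replicate-and-truncate (walls * ceil(n/4), sliced to n); same O(n) cost, objective: simpler.

-- ===== PORT A =====
-- walls = ["south", "north", "east", "west"]
def pvWalls : List String := ["south", "north", "east", "west"]

def distribute_entrances_py (num_entrances : Int) : List String :=
  if num_entrances ≤ 0 then []
  else if num_entrances ≥ 4 then
    -- result = list(walls); for i in range(extras): result.append(walls[i % 4])
    (PySem.List.pyRange 0 (num_entrances - 4) 1).foldl
      (fun result i => result ++ [PySem.List.pyGetD pvWalls (PySem.Int.mod i 4) ""]) pvWalls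
  else
    -- walls[:num_entrances]
    PySem.List.slice pvWalls none (some num_entrances)

-- ===== PORT B =====
-- (walls * ((num_entrances + 3) // 4))[:num_entrances]
-- Python `walls * q` is [] for q ≤ 0; List.replicate q.toNat is exact there (toNat of q ≤ 0 is 0).
def distribute_entrances_py_alt (num_entrances : Int) : List String :=
  PySem.List.slice
    ((List.replicate (PySem.Int.floordiv (num_entrances + 3) 4).toNat pvWalls).flatten)
    none (some num_entrances)

-- ===== PRECONDITION & SPEC =====
def Spec_distribute_entrances_py (num_entrances : Int) (out : List String) : Prop := out = distribute_entrances_py_alt num_entrances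
instance (num_entrances : Int) (out : List String) : Decidable (Spec_distribute_entrances_py num_entrances out) := by unfold Spec_distribute_entrances_py; infer_instance

-- ===== CLAIM (what is proved, stated in full; the proofs are below) =====
def Claim_equal_distribute_entrances_py : Prop := ∀ (num_entrances : Int), Dom_distribute_entrances_py num_entrances → Spec_distribute_entrances_py num_entrances (distribute_entrances_py num_entrances)

-- ===== LEMMAS AND PROOFS =====

-- the element A's extras loop appends at Nat index k
def pvG (k : Nat) : String := PySem.List.pyGetD pvWalls (PySem.Int.mod (k : Int) 4) ""

theorem pvG_add_four (k : Nat) : pvG (4 + k) = pvG k := by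
  unfold pvG
  have h : PySem.Int.mod ((4 + k : Nat) : Int) 4 = PySem.Int.mod (k : Int) 4 := by
    simp [PySem.Int.mod]
  rw [h]

theorem pvMapRangeG (m : Nat) :
    (List.range (4 + m)).map pvG = pvWalls ++ (List.range m).map pvG := by
  rw [List.range_add, List.map_append, List.map_map]
  have h4 : (List.range 4).map pvG = pvWalls := by decide
  rw [h4]
  congr 1
  apply List.map_congr_left
  intro k _
  exact pvG_add_four k

-- the flattened replication is the pvG-cycle of length 4q
theorem pvFlattenReplicate (q : Nat) :
    (List.replicate q pvWalls).flatten = (List.range (4 * q)).map pvG := by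
  induction q with
  | zero => simp
  | succ p ih =>
      have h : 4 * (p + 1) = 4 + 4 * p := by omega
      rw [List.replicate_succ, List.flatten_cons, ih, h, pvMapRangeG]

theorem pvMapPyRange (n : Int) :
    (PySem.List.pyRange 0 n 1).map
        (fun i => PySem.List.pyGetD pvWalls (PySem.Int.mod i 4) "") =
    (List.range n.toNat).map pvG := by
  rw [PySem.List.pyRange_one, List.map_map]
  simp only [Int.sub_zero]
  apply List.map_congr_left
  intro k _
  simp [pvG]

-- A's result, in all cases, is the first n.toNat elements of the pvG cycle
theorem pvA_eq_take (n : Int) :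
    distribute_entrances_py n = List.take n.toNat ((List.range n.toNat).map pvG) := by
  unfold distribute_entrances_py
  by_cases h0 : n ≤ 0
  · have : n.toNat = 0 := by omega
    simp [h0, this]
  · by_cases h4 : n ≥ 4
    · rw [if_neg h0, if_pos h4, PySem.List.foldl_append_singleton_eq_map, pvMapPyRange]
      have hsplit : n.toNat = 4 + (n - 4).toNat := by omega
      rw [List.take_of_length_le (by simp), hsplit, pvMapRangeG]
    · rw [if_neg h0, if_neg h4]
      have h1 : n = 1 ∨ n = 2 ∨ n = 3 := by omega
      rcases h1 with h | h | h <;> subst h <;> decide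

-- ===== VERDICT (by name: the statement is the Claim_ definition above) =====
theorem distribute_entrances_py_spec : Claim_equal_distribute_entrances_py := by
  intro n _
  show distribute_entrances_py n = distribute_entrances_py_alt n
  unfold distribute_entrances_py_alt
  rw [pvA_eq_take n, pvFlattenReplicate]
  have hfd := PySem.Int.floordiv_eq_ediv_of_pos (a := n + 3) (b := 4) (by norm_num)
  by_cases h0 : n ≤ 0
  · have hq : (PySem.Int.floordiv (n + 3) 4).toNat = 0 := by omega
    have hn : n.toNat = 0 := by omega
    rw [hq, hn]
    simp [PySem.List.slice]
  · have hnn : (0 : Int) ≤ n := by omega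
    rw [PySem.List.slice_to]
    have hle : n.toNat ≤ 4 * (PySem.Int.floordiv (n + 3) 4).toNat := by omega
    rw [← List.map_take, ← List.map_take, List.take_range, List.take_range,
        Nat.min_self, Nat.min_eq_left hle]
    exact hnn
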